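-- pv_equiv track=rewrite | github.com/horimpark/code-playground | codewars/6kyu/Which are in?.py | in_array
-- ===== SOURCE A (Python) =====
-- def in_array(array1, array2):
--     res = []
--     for x in array1:
--         for y in array2:
--             if x in y:
--                 res.append(x)
--                 break
--     return sorted(set(res))
-- ===== SOURCE B (Python) =====
-- def in_array(array1, array2):
--     subs = {y[i:j] for y in array2 for i in range(len(y) + 1) for j in range(i, len(y) + 1)}
--     return sorted({x for x in array1 if x in subs})
-- ===== Notes on version B (the rewrite author's own statement) =====
-- stated objective: faster
-- what changed: B builds a set of all substrings of array2's strings once and keeps each element of array1 by a single set-membership lookup, instead of A's per-element scan of array2 with a substring test.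
import Mathlib
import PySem

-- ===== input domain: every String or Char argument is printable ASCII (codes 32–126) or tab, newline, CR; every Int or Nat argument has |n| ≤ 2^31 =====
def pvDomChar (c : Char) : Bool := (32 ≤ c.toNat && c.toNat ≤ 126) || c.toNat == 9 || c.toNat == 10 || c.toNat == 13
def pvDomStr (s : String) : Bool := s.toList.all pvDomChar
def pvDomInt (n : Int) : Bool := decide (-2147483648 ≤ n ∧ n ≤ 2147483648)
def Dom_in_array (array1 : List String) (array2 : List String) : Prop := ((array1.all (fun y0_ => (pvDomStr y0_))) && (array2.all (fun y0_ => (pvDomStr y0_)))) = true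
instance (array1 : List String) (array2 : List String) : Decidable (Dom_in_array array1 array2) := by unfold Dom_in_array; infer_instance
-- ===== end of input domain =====

-- B replaces A's per-element scan of array2 with a substring index of array2 built once, then a set lookup per element of array1; proved equal on all inputs.


-- ===== PORT A =====
-- the inner 'for y in array2: if x in y: res.append(x); break'
def pvLoopA (x : String) (ys : List String) (res : List String) : List String :=
  match ys with
  | [] => res
  | y :: t => if PySem.Str.isIn x y then res ++ [x] else pvLoopA x t res

def in_array (array1 : List String) (array2 : List String) : List String :=
  let res := array1.foldl (fun res x => pvLoopA x array2 res) []
  PySem.List.sorted (PySem.Set.ofList res) (fun s => s) false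

-- ===== PORT B =====
-- {y[i:j] for y in array2 for i in range(len(y)+1) for j in range(i, len(y)+1)}
def pvSubsList (array2 : List String) : List String :=
  array2.flatMap (fun y =>
    (PySem.List.pyRange 0 (PySem.Str.len y + 1) 1).flatMap (fun i =>
      (PySem.List.pyRange i (PySem.Str.len y + 1) 1).map (fun j =>
        PySem.Str.slice y (some i) (some j))))

def in_array_alt (array1 : List String) (array2 : List String) : List String :=
  let subs := PySem.Set.ofList (pvSubsList array2)
  PySem.List.sorted
    (PySem.Set.ofList (array1.filter (fun x => PySem.Set.contains subs x)))
    (fun s => s) false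

-- ===== PRECONDITION & SPEC =====
def Spec_in_array (array1 : List String) (array2 : List String) (out : List String) : Prop := out = in_array_alt array1 array2
instance (array1 : List String) (array2 : List String) (out : List String) : Decidable (Spec_in_array array1 array2 out) := by unfold Spec_in_array; infer_instance

-- ===== CLAIM (what is proved, stated in full; the proofs are below) =====
def Claim_equal_in_array : Prop := ∀ (array1 : List String) (array2 : List String), Dom_in_array array1 array2 → Spec_in_array array1 array2 (in_array array1 array2)

-- ===== LEMMAS AND PROOFS =====

-- A's inner loop appends x once iff some y contains it
theorem pvLoopA_eq (x : String) (ys : List String) (res : List String) :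
    pvLoopA x ys res = if ys.any (fun y => PySem.Str.isIn x y) then res ++ [x] else res := by
  induction ys with
  | nil => simp [pvLoopA]
  | cons y t ih =>
    rcases h : PySem.Str.isIn x y with _ | _
    · simp only [pvLoopA, h, Bool.false_eq_true, if_false, ih, List.any_cons, Bool.false_or]
    · simp only [pvLoopA, h, if_true, List.any_cons, Bool.true_or]

-- A's outer loop is a filter
theorem pvFoldA_eq (a2 : List String) (a1 : List String) (res : List String) :
    a1.foldl (fun res x => pvLoopA x a2 res) res
      = res ++ a1.filter (fun x => a2.any (fun y => PySem.Str.isIn x y)) := by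
  induction a1 generalizing res with
  | nil => simp
  | cons x t ih =>
    rw [List.foldl_cons, pvLoopA_eq, List.filter_cons]
    rcases h : a2.any (fun y => PySem.Str.isIn x y) with _ | _
    · simp only [Bool.false_eq_true, if_false, ih]
    · simp only [if_true, ih, List.append_assoc, List.singleton_append]

-- the substring index contains x iff x is a substring of some y in array2
theorem pvMem_subsList (x : String) (a2 : List String) :
    x ∈ pvSubsList a2 ↔ a2.any (fun y => PySem.Str.isIn x y) = true := by
  simp only [pvSubsList, List.mem_flatMap, List.mem_map, List.any_eq_true,
    PySem.List.mem_pyRange_one, PySem.Str.isIn_iff_infix]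
  constructor
  · rintro ⟨y, hy, i, ⟨hi0, _⟩, j, ⟨hij, hj⟩, hx⟩
    refine ⟨y, hy, ?_⟩
    have h0j : (0:Int) ≤ j := le_trans hi0 hij
    have hslice : (PySem.Str.slice y (some i) (some j)).toList
        = (y.toList.drop i.toNat).take (j.toNat - i.toNat) := by
      rw [PySem.Str.toList_slice, PySem.Chars.slice_eq_listSlice,
        PySem.List.slice_toNat y.toList hi0 h0j]
    rw [← hx, hslice]
    exact ((y.toList.drop i.toNat).take_prefix _).isInfix.trans
      (y.toList.drop_suffix _).isInfix
  · rintro ⟨y, hy, pre, suf, hsplit⟩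
    have hlen : pre.length + x.toList.length ≤ y.toList.length := by
      rw [← hsplit]; simp
    refine ⟨y, hy, (pre.length : Int), ⟨by positivity, ?_⟩,
      ((pre.length + x.toList.length : Nat) : Int), ⟨by omega, ?_⟩, ?_⟩
    · simp only [PySem.Str.len_eq]; push_cast; omega
    · simp only [PySem.Str.len_eq]; push_cast; omega
    · apply String.toList_inj.mp
      rw [PySem.Str.toList_slice, PySem.Chars.slice_eq_listSlice,
        PySem.List.slice_natCast y.toList, ← hsplit]
      simp

-- the two keep-predicates agree
theorem pvPred_eq (a2 : List String) (x : String) :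
    PySem.Set.contains (PySem.Set.ofList (pvSubsList a2)) x
      = a2.any (fun y => PySem.Str.isIn x y) := by
  rcases h : a2.any (fun y => PySem.Str.isIn x y) with _ | _
  · rw [Bool.eq_false_iff]
    intro hc
    have hmem := (PySem.Set.mem_ofList (pvSubsList a2) x).mp
      ((PySem.Set.contains_iff _ _).mp hc)
    have := (pvMem_subsList x a2).mp hmem
    rw [h] at this
    exact Bool.false_ne_true this
  · exact (PySem.Set.contains_iff _ _).mpr
      ((PySem.Set.mem_ofList (pvSubsList a2) x).mpr ((pvMem_subsList x a2).mpr h))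

-- ===== VERDICT (by name: the statement is the Claim_ definition above) =====
theorem in_array_spec : Claim_equal_in_array := by
  intro array1 array2 _
  unfold Spec_in_array in_array in_array_alt
  rw [pvFoldA_eq]
  simp only [List.nil_append]
  congr 1
  congr 1
  apply List.filter_congr
  intro x _
  rw [pvPred_eq]
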